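-- pv_equiv track=rewrite | github.com/liujuanjuan1984/lifeos-cli | src/lifeos_cli/db/services/recurrence_core.py | normalize_weekday_names
-- ===== SOURCE A (Python) =====
-- from collections.abc import Sequence
--
-- VALID_WEEKDAY_NAMES = (
--     "monday",
--     "tuesday",
--     "wednesday",
--     "thursday",
--     "friday",
--     "saturday",
--     "sunday",
-- )
--
-- _WEEKDAY_TO_INDEX = {weekday: index for index, weekday in enumerate(VALID_WEEKDAY_NAMES)}
--
-- class RecurrenceValidationError(ValueError):
--     """Raised when a shared recurrence rule is invalid."""
--
-- def normalize_weekday_names(weekdays: Sequence[str] | None) -> tuple[str, ...] | None: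
--     """Normalize an optional weekday name set."""
--     if weekdays is None:
--         return None
--     normalized: list[str] = []
--     for weekday in weekdays:
--         normalized_weekday = weekday.strip().lower()
--         if not normalized_weekday:
--             continue
--         if normalized_weekday not in _WEEKDAY_TO_INDEX:
--             allowed = ", ".join(VALID_WEEKDAY_NAMES)
--             raise RecurrenceValidationError(
--                 f"Invalid weekday {normalized_weekday!r}. Expected one of: {allowed}"
--             )
--         if normalized_weekday not in normalized:
--             normalized.append(normalized_weekday)
--     if not normalized:
--         return None
--     return tuple(sorted(normalized, key=lambda weekday: _WEEKDAY_TO_INDEX[weekday]))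
-- ===== SOURCE B (Python) =====
-- VALID_WEEKDAY_NAMES = (
--     "monday",
--     "tuesday",
--     "wednesday",
--     "thursday",
--     "friday",
--     "saturday",
--     "sunday",
-- )
--
-- _WEEKDAY_TO_INDEX = {weekday: index for index, weekday in enumerate(VALID_WEEKDAY_NAMES)}
--
-- class RecurrenceValidationError(ValueError):
--     """Raised when a shared recurrence rule is invalid."""
--
-- def normalize_weekday_names(weekdays):
--     """Normalize an optional weekday name set (staged passes, no loop accumulator, no sort)."""
--     if weekdays is None:
--         return None
--     cleaned = [name for name in (w.strip().lower() for w in weekdays) if name]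
--     invalid = [name for name in cleaned if name not in _WEEKDAY_TO_INDEX]
--     if invalid:
--         allowed = ", ".join(VALID_WEEKDAY_NAMES)
--         raise RecurrenceValidationError(
--             f"Invalid weekday {invalid[0]!r}. Expected one of: {allowed}"
--         )
--     if not cleaned:
--         return None
--     return tuple(w for w in VALID_WEEKDAY_NAMES if w in cleaned)
-- ===== Notes on version B (the rewrite author's own statement) =====
-- stated objective: simpler
-- what changed: B is a pipeline of staged passes (map-clean, filter-empties, collect invalids, then one filtering pass over the fixed canonical weekday tuple) instead of A's single loop with an ordered dedup accumulator followed by a key-sort; dedup and index-order both fall out of filtering the canonical tuple, so there is no accumulator and no sort.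
import Mathlib
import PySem

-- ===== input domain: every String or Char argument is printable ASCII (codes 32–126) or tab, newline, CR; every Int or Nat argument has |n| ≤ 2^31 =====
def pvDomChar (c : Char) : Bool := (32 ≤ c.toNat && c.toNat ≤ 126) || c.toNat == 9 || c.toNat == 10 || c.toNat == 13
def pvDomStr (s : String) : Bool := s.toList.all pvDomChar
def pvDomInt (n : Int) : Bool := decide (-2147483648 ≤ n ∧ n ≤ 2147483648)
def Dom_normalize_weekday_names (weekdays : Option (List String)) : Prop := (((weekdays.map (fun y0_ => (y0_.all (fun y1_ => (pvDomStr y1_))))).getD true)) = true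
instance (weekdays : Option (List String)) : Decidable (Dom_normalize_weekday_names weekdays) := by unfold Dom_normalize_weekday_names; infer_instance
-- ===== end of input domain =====

-- B replaces A's single loop (ordered dedup accumulator + final key-sort) by staged
-- map/filter passes, the last over the fixed canonical weekday tuple (objective: simpler).

-- shared module constants
def VALID_WEEKDAY_NAMES : List String :=
  ["monday", "tuesday", "wednesday", "thursday", "friday", "saturday", "sunday"]

def WEEKDAY_TO_INDEX : PySem.Dict String Int :=
  PySem.Dict.ofList [("monday", 0), ("tuesday", 1), ("wednesday", 2), ("thursday", 3),
    ("friday", 4), ("saturday", 5), ("sunday", 6)]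

-- ===== PORT A =====
-- the for-loop of A: builds `normalized` in input order, deduplicating by membership;
-- `none` = the RecurrenceValidationError raise (excluded by Pre_)
def nwnLoopA : List String → List String → Option (List String)
  | [], normalized => some normalized
  | weekday :: rest, normalized =>
    let n := PySem.Str.lower (PySem.Str.strip weekday)
    if n = "" then nwnLoopA rest normalized
    else if WEEKDAY_TO_INDEX.contains n = false then none
    else if n ∈ normalized then nwnLoopA rest normalized
    else nwnLoopA rest (normalized ++ [n])

def normalize_weekday_names (weekdays : Option (List String)) : Option (List String) :=
  match weekdays with
  | none => none
  | some ws =>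
    match nwnLoopA ws [] with
    | none => none   -- exception path, outside Pre_
    | some normalized =>
      if normalized = [] then none
      -- _WEEKDAY_TO_INDEX[weekday]: key always present on this path, getD is exact here
      else some (PySem.List.sorted normalized (fun w => WEEKDAY_TO_INDEX.getD w 0) false)

-- ===== PORT B =====
-- B is loop-free: staged comprehensions (clean, drop empties, collect invalids),
-- then one filtering pass over the canonical tuple; `none` after `invalid ≠ []` = the raise
def normalize_weekday_names_alt (weekdays : Option (List String)) : Option (List String) :=
  match weekdays with
  | none => none
  | some ws =>
    let cleaned := (ws.map (fun w => PySem.Str.lower (PySem.Str.strip w))).filter (fun n => n ≠ "")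
    let invalid := cleaned.filter (fun n => !(WEEKDAY_TO_INDEX.contains n))
    if invalid ≠ [] then none   -- exception path, outside Pre_
    else if cleaned = [] then none
    else some (VALID_WEEKDAY_NAMES.filter (fun w => cleaned.contains w))

-- ===== PRECONDITION & SPEC =====
-- Pre_ excludes exactly the inputs where A (and B) raise RecurrenceValidationError:
-- some stripped+lowercased name is non-empty and not a valid weekday name.
def Pre_normalize_weekday_names (weekdays : Option (List String)) : Prop :=
  ∀ s ∈ weekdays.getD [],
    PySem.Str.lower (PySem.Str.strip s) = "" ∨
    PySem.Str.lower (PySem.Str.strip s) ∈ VALID_WEEKDAY_NAMES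

instance (weekdays : Option (List String)) : Decidable (Pre_normalize_weekday_names weekdays) := by
  unfold Pre_normalize_weekday_names; infer_instance

def pvWitness_normalize_weekday_names : Option (List String) :=
  some ["Monday", " friday ", "monday", ""]

def Spec_normalize_weekday_names (weekdays : Option (List String)) (out : Option (List String)) : Prop := out = normalize_weekday_names_alt weekdays
instance (weekdays : Option (List String)) (out : Option (List String)) : Decidable (Spec_normalize_weekday_names weekdays out) := by unfold Spec_normalize_weekday_names; infer_instance

-- ===== CLAIM (what is proved, stated in full; the proofs are below) =====
def Claim_equal_normalize_weekday_names : Prop := ∀ (weekdays : Option (List String)), Dom_normalize_weekday_names weekdays → Pre_normalize_weekday_names weekdays → Spec_normalize_weekday_names weekdays (normalize_weekday_names weekdays)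

-- ===== LEMMAS AND PROOFS =====

-- the index dict's keys are exactly the valid weekday names
theorem keys_weekday_to_index : WEEKDAY_TO_INDEX.keys = VALID_WEEKDAY_NAMES := by rfl

theorem contains_of_mem_valid (n : String) (h : n ∈ VALID_WEEKDAY_NAMES) :
    WEEKDAY_TO_INDEX.contains n = true := by
  rw [PySem.Dict.contains_iff_mem_keys, keys_weekday_to_index]
  exact h

-- B's cleaned list, as a function (for stating the loop invariant)
def cleanedOf (ws : List String) : List String :=
  (ws.map (fun w => PySem.Str.lower (PySem.Str.strip w))).filter (fun n => n ≠ "")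

-- under Pre_, A's loop returns its accumulator holding exactly the elements of `cleanedOf`
theorem loopA_some (ws : List String)
    (hpre : ∀ s ∈ ws, PySem.Str.lower (PySem.Str.strip s) = "" ∨
      PySem.Str.lower (PySem.Str.strip s) ∈ VALID_WEEKDAY_NAMES)
    (acc : List String) (hnd : acc.Nodup)
    (hval : ∀ x ∈ acc, x ∈ VALID_WEEKDAY_NAMES) :
    ∃ acc', nwnLoopA ws acc = some acc' ∧ acc'.Nodup ∧
      (∀ x ∈ acc', x ∈ VALID_WEEKDAY_NAMES) ∧
      (∀ x, x ∈ acc' ↔ x ∈ acc ∨ x ∈ cleanedOf ws) := by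
  induction ws generalizing acc with
  | nil =>
    exact ⟨acc, rfl, hnd, hval, fun x => by simp [cleanedOf]⟩
  | cons w rest ih =>
    have hrest : ∀ s ∈ rest, PySem.Str.lower (PySem.Str.strip s) = "" ∨
        PySem.Str.lower (PySem.Str.strip s) ∈ VALID_WEEKDAY_NAMES :=
      fun s hs => hpre s (List.mem_cons_of_mem w hs)
    simp only [nwnLoopA]
    set n := PySem.Str.lower (PySem.Str.strip w) with hn
    have hclean : cleanedOf (w :: rest) =
        if n = "" then cleanedOf rest else n :: cleanedOf rest := by
      simp only [cleanedOf, List.map_cons, List.filter_cons, ← hn]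
      by_cases h0 : n = ""
      · simp [h0]
      · simp [h0]
    by_cases h0 : n = ""
    · rw [if_pos h0]
      obtain ⟨acc', h1, h2, h3, h4⟩ := ih hrest acc hnd hval
      exact ⟨acc', h1, h2, h3, by simpa [hclean, h0] using h4⟩
    · rw [if_neg h0]
      have hv : n ∈ VALID_WEEKDAY_NAMES := (hpre w List.mem_cons_self).resolve_left h0
      have hc : WEEKDAY_TO_INDEX.contains n = true := contains_of_mem_valid n hv
      rw [hc]
      simp only [Bool.true_eq_false, if_false]
      by_cases hin : n ∈ acc
      · rw [if_pos hin]
        obtain ⟨acc', h1, h2, h3, h4⟩ := ih hrest acc hnd hval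
        refine ⟨acc', h1, h2, h3, fun x => ?_⟩
        rw [h4, hclean, if_neg h0, List.mem_cons]
        constructor
        · rintro (hx | hx)
          · exact Or.inl hx
          · exact Or.inr (Or.inr hx)
        · rintro (hx | rfl | hx)
          · exact Or.inl hx
          · exact Or.inl hin
          · exact Or.inr hx
      · rw [if_neg hin]
        have hnd' : (acc ++ [n]).Nodup := by
          refine List.Nodup.append hnd (List.nodup_singleton n) ?_
          intro a ha hb
          have : a = n := by simpa using hb
          exact hin (this ▸ ha)
        have hval' : ∀ x ∈ acc ++ [n], x ∈ VALID_WEEKDAY_NAMES := by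
          intro x hx
          rcases List.mem_append.mp hx with hx | hx
          · exact hval x hx
          · simp only [List.mem_singleton] at hx; subst hx; exact hv
        obtain ⟨acc', h1, h2, h3, h4⟩ := ih hrest (acc ++ [n]) hnd' hval'
        refine ⟨acc', h1, h2, h3, fun x => ?_⟩
        rw [h4, hclean, if_neg h0, List.mem_append, List.mem_singleton, List.mem_cons]
        constructor
        · rintro ((hx | rfl) | hx)
          · exact Or.inl hx
          · exact Or.inr (Or.inl rfl)
          · exact Or.inr (Or.inr hx)
        · rintro (hx | rfl | hx)
          · exact Or.inl (Or.inl hx)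
          · exact Or.inl (Or.inr rfl)
          · exact Or.inr hx

-- the canonical-order filter is exactly Python's sort by weekday index
theorem sorted_eq_filter (acc : List String) (hnd : acc.Nodup)
    (hval : ∀ x ∈ acc, x ∈ VALID_WEEKDAY_NAMES) :
    PySem.List.sorted acc (fun w => WEEKDAY_TO_INDEX.getD w 0) false =
      VALID_WEEKDAY_NAMES.filter (fun w => decide (w ∈ acc)) := by
  apply PySem.List.sorted_eq_of_perm_of_pairwise_lt
  · rw [List.perm_ext_iff_of_nodup (List.Nodup.filter _ (by decide)) hnd]
    intro x
    simp only [List.mem_filter, decide_eq_true_eq]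
    exact ⟨fun h => h.2, fun h => ⟨hval x h, h⟩⟩
  · apply List.Pairwise.filter
    decide

theorem normalize_weekday_names_eq (weekdays : Option (List String))
    (hpre : Pre_normalize_weekday_names weekdays) :
    normalize_weekday_names weekdays = normalize_weekday_names_alt weekdays := by
  cases weekdays with
  | none => rfl
  | some ws =>
    simp only [normalize_weekday_names, normalize_weekday_names_alt]
    obtain ⟨acc, h1, hnd, hval, hmem⟩ :=
      loopA_some ws hpre [] List.nodup_nil (by simp)
    rw [h1]
    simp only [List.not_mem_nil, false_or] at hmem
    -- B's invalid pass is empty under Pre_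
    have hcv : ∀ x ∈ cleanedOf ws, x ∈ VALID_WEEKDAY_NAMES := by
      intro x hx
      simp only [cleanedOf, List.mem_filter, List.mem_map, decide_eq_true_eq] at hx
      obtain ⟨⟨s, hs, rfl⟩, hne⟩ := hx
      exact (hpre s hs).resolve_left hne
    have hinv : (cleanedOf ws).filter (fun n => !(WEEKDAY_TO_INDEX.contains n)) = [] := by
      rw [List.filter_eq_nil_iff]
      intro n hn
      simp [contains_of_mem_valid n (hcv n hn)]
    show (if acc = [] then none
          else some (PySem.List.sorted acc (fun w => WEEKDAY_TO_INDEX.getD w 0) false)) = _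
    rw [show ((ws.map (fun w => PySem.Str.lower (PySem.Str.strip w))).filter
          (fun n => n ≠ "")) = cleanedOf ws from rfl, hinv]
    simp only [ne_eq, not_true_eq_false, if_false]
    have hempty : acc = [] ↔ cleanedOf ws = [] := by
      simp only [List.eq_nil_iff_forall_not_mem]
      exact ⟨fun h x hx => h x ((hmem x).mpr hx), fun h x hx => h x ((hmem x).mp hx)⟩
    by_cases hz : acc = []
    · rw [if_pos hz, if_pos (hempty.mp hz)]
    · rw [if_neg hz, if_neg (fun h => hz (hempty.mpr h))]
      rw [sorted_eq_filter acc hnd hval]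
      congr 1
      apply List.filter_congr
      intro x _
      simp only [hmem x]
      simp

-- ===== VERDICT (by name: the statement is the Claim_ definition above) =====
theorem normalize_weekday_names_spec : Claim_equal_normalize_weekday_names := by
  intro weekdays _ hpre
  exact normalize_weekday_names_eq weekdays hpre
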